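-- pv_equiv track=rewrite | github.com/IPHYS-Bioinformatics/LORA | src/utils/phylo_tree.py | phylo_number_to_color
-- ===== SOURCE A (Python) =====
-- def phylo_number_to_color(list_of_numbers):
--     color_list = [str(i) for i in list_of_numbers]
--     color_list = list(map(lambda x: x.replace('0', 'black'), color_list))
--     color_list = list(map(lambda x: x.replace('1', 'red'), color_list))
--     color_list = list(map(lambda x: x.replace('2', 'lime'), color_list))
--     color_list = list(map(lambda x: x.replace('3', 'cyan'), color_list))
--     color_list = list(map(lambda x: x.replace('4', 'purple'), color_list))
--     color_list = list(map(lambda x: x.replace('5', 'orange'), color_list))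
--     color_list = list(map(lambda x: x.replace('6', 'green'), color_list))
--     color_list = list(map(lambda x: x.replace('7', 'blue'), color_list))
--     color_list = list(map(lambda x: x.replace('8', 'magenta'), color_list))
--     color_list = list(map(lambda x: x.replace('9', 'grey'), color_list))
--     color_list = list(map(lambda x: x.replace('10', 'yellow'), color_list))
--     return color_list
-- ===== SOURCE B (Python) =====
-- _TABLE = str.maketrans({'0': 'black', '1': 'red', '2': 'lime', '3': 'cyan',
--                         '4': 'purple', '5': 'orange', '6': 'green', '7': 'blue',
--                         '8': 'magenta', '9': 'grey'})
--
--
-- def phylo_number_to_color(list_of_numbers):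
--     return [str(i).translate(_TABLE) for i in list_of_numbers]
-- ===== Notes on version B (the rewrite author's own statement) =====
-- stated objective: idiomatic
-- what changed: Replaces the eleven sequential full-string .replace passes with a single per-character translation table (str.maketrans/translate) applied once per element; the final '10'->'yellow' pass is dropped because after the digit substitutions no digit remains, so it can never fire.
import Mathlib
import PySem

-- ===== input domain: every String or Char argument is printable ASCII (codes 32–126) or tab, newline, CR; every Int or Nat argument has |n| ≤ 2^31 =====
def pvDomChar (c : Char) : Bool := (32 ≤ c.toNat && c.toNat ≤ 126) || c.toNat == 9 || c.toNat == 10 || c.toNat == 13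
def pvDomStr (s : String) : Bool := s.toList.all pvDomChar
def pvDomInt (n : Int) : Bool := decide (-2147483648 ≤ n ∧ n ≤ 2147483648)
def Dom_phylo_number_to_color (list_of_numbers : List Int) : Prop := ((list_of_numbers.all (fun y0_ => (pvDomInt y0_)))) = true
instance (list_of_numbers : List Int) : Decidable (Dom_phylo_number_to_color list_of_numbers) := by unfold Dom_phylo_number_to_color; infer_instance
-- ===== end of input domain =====

-- B replaces A's eleven sequential full-string replace passes by one per-character
-- translation table applied once per element (the dead '10'->'yellow' pass is dropped);
-- objective: idiomatic, single pass per string.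

-- ===== PORT A =====
def phylo_number_to_color (list_of_numbers : List Int) : List String :=
  let color_list := list_of_numbers.map (fun i => PySem.Int.toStr i)
  let color_list := color_list.map (fun x => PySem.Str.replace x "0" "black")
  let color_list := color_list.map (fun x => PySem.Str.replace x "1" "red")
  let color_list := color_list.map (fun x => PySem.Str.replace x "2" "lime")
  let color_list := color_list.map (fun x => PySem.Str.replace x "3" "cyan")
  let color_list := color_list.map (fun x => PySem.Str.replace x "4" "purple")
  let color_list := color_list.map (fun x => PySem.Str.replace x "5" "orange")
  let color_list := color_list.map (fun x => PySem.Str.replace x "6" "green")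
  let color_list := color_list.map (fun x => PySem.Str.replace x "7" "blue")
  let color_list := color_list.map (fun x => PySem.Str.replace x "8" "magenta")
  let color_list := color_list.map (fun x => PySem.Str.replace x "9" "grey")
  let color_list := color_list.map (fun x => PySem.Str.replace x "10" "yellow")
  color_list

-- ===== PORT B =====
-- the translation table of Source B: one digit char -> its color name; other chars pass through
def pvTable (c : Char) : List Char :=
  if c = '0' then "black".toList
  else if c = '1' then "red".toList
  else if c = '2' then "lime".toList
  else if c = '3' then "cyan".toList
  else if c = '4' then "purple".toList
  else if c = '5' then "orange".toList
  else if c = '6' then "green".toList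
  else if c = '7' then "blue".toList
  else if c = '8' then "magenta".toList
  else if c = '9' then "grey".toList
  else [c]

def phylo_number_to_color_alt (list_of_numbers : List Int) : List String :=
  list_of_numbers.map (fun i => String.ofList ((PySem.Int.toChars i).flatMap pvTable))

-- ===== PRECONDITION & SPEC =====
def Spec_phylo_number_to_color (list_of_numbers : List Int) (out : List String) : Prop := out = phylo_number_to_color_alt list_of_numbers
instance (list_of_numbers : List Int) (out : List String) : Decidable (Spec_phylo_number_to_color list_of_numbers out) := by unfold Spec_phylo_number_to_color; infer_instance

-- ===== CLAIM (what is proved, stated in full; the proofs are below) =====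
def Claim_equal_phylo_number_to_color : Prop := ∀ (list_of_numbers : List Int), Dom_phylo_number_to_color list_of_numbers → Spec_phylo_number_to_color list_of_numbers (phylo_number_to_color list_of_numbers)

-- ===== LEMMAS AND PROOFS =====

-- replacing a SINGLE character d is the charwise substitution
theorem go_single (d : Char) (new : List Char) :
    ∀ (cs acc : List Char),
      PySem.Chars.replace.go [d] new cs.length cs acc
        = acc.reverse ++ cs.flatMap (fun c => if c = d then new else [c]) := by
  intro cs
  induction cs with
  | nil => intro acc; simp [PySem.Chars.replace.go]
  | cons c t ih =>
    intro acc
    simp only [List.length_cons, PySem.Chars.replace.go]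
    by_cases h : c = d
    · subst h
      simp [List.isPrefixOf, ih]
    · simp [List.isPrefixOf, Ne.symm h, h, ih]

theorem replace_single (cs : List Char) (d : Char) (new : List Char) :
    PySem.Chars.replace cs [d] new = cs.flatMap (fun c => if c = d then new else [c]) := by
  simpa [PySem.Chars.replace] using go_single d new cs []

-- replacing "10" in a string containing no '1' does nothing
theorem go_no_one (new : List Char) :
    ∀ (cs acc : List Char), '1' ∉ cs →
      PySem.Chars.replace.go ['1','0'] new cs.length cs acc = acc.reverse ++ cs := by
  intro cs
  induction cs with
  | nil => intro acc _; simp [PySem.Chars.replace.go]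
  | cons c t ih =>
    intro acc h
    simp only [List.length_cons, PySem.Chars.replace.go]
    have hc : c ≠ '1' := fun e => h (by simp [e])
    simp [List.isPrefixOf, Ne.symm hc, ih _ (fun m => h (by simp [m]))]

theorem replace_ten_of_no_one (cs : List Char) (h : '1' ∉ cs) :
    PySem.Chars.replace cs ['1','0'] "yellow".toList = cs := by
  simpa [PySem.Chars.replace] using go_no_one "yellow".toList cs [] h

-- color names contain no '1'
theorem one_not_mem_table (c : Char) : '1' ∉ pvTable c := by
  unfold pvTable
  split_ifs with h0 h1 h2 h3 h4 h5 h6 h7 h8 h9 <;> simp_all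
  exact fun e => h1 e.symm

-- A's ten single-digit substitutions, composed
def pvChain (cs : List Char) : List Char :=
  let f := fun (d : Char) (w : List Char) (x : List Char) =>
    x.flatMap (fun c => if c = d then w else [c])
  f '9' "grey".toList (f '8' "magenta".toList (f '7' "blue".toList (f '6' "green".toList
    (f '5' "orange".toList (f '4' "purple".toList (f '3' "cyan".toList
      (f '2' "lime".toList (f '1' "red".toList (f '0' "black".toList cs)))))))))

theorem pvChain_append (a b : List Char) : pvChain (a ++ b) = pvChain a ++ pvChain b := by
  simp [pvChain, List.flatMap_append]

theorem pvChain_single (c : Char) : pvChain [c] = pvTable c := by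
  unfold pvTable
  split_ifs with h0 h1 h2 h3 h4 h5 h6 h7 h8 h9 <;>
    simp_all [pvChain]

theorem pvChain_eq_flatMap (cs : List Char) : pvChain cs = cs.flatMap pvTable := by
  induction cs with
  | nil => simp [pvChain]
  | cons c t ih =>
    have : (c :: t) = [c] ++ t := rfl
    rw [this, pvChain_append, pvChain_single, ih]
    simp

theorem one_not_mem_flatMap (cs : List Char) : '1' ∉ cs.flatMap pvTable := by
  intro h
  rcases List.mem_flatMap.mp h with ⟨c, _, hc⟩
  exact one_not_mem_table c hc

theorem chars_chain (cs : List Char) :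
    PySem.Chars.replace (pvChain cs) ['1','0'] "yellow".toList = cs.flatMap pvTable := by
  rw [pvChain_eq_flatMap]
  exact replace_ten_of_no_one _ (one_not_mem_flatMap cs)

-- per-string: A's eleven replace passes equal B's one-pass translation
theorem chain_str (s : String) :
    (PySem.Str.replace (PySem.Str.replace (PySem.Str.replace (PySem.Str.replace
      (PySem.Str.replace (PySem.Str.replace (PySem.Str.replace (PySem.Str.replace
        (PySem.Str.replace (PySem.Str.replace (PySem.Str.replace s
          "0" "black") "1" "red") "2" "lime") "3" "cyan") "4" "purple")
          "5" "orange") "6" "green") "7" "blue") "8" "magenta") "9" "grey")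
          "10" "yellow").toList
      = s.toList.flatMap pvTable := by
  simp only [PySem.Str.toList_replace,
    show ("0" : String).toList = ['0'] from rfl,
    show ("1" : String).toList = ['1'] from rfl,
    show ("2" : String).toList = ['2'] from rfl,
    show ("3" : String).toList = ['3'] from rfl,
    show ("4" : String).toList = ['4'] from rfl,
    show ("5" : String).toList = ['5'] from rfl,
    show ("6" : String).toList = ['6'] from rfl,
    show ("7" : String).toList = ['7'] from rfl,
    show ("8" : String).toList = ['8'] from rfl,
    show ("9" : String).toList = ['9'] from rfl,
    show ("10" : String).toList = ['1','0'] from rfl,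
    replace_single]
  exact chars_chain s.toList

theorem string_eq_of_toList {s t : String} (h : s.toList = t.toList) : s = t := by
  have := congrArg String.ofList h
  simpa using this

-- per element
theorem elem_eq (i : Int) :
    PySem.Str.replace (PySem.Str.replace (PySem.Str.replace (PySem.Str.replace
      (PySem.Str.replace (PySem.Str.replace (PySem.Str.replace (PySem.Str.replace
        (PySem.Str.replace (PySem.Str.replace (PySem.Str.replace (PySem.Int.toStr i)
          "0" "black") "1" "red") "2" "lime") "3" "cyan") "4" "purple")
          "5" "orange") "6" "green") "7" "blue") "8" "magenta") "9" "grey")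
          "10" "yellow"
      = String.ofList ((PySem.Int.toChars i).flatMap pvTable) := by
  apply string_eq_of_toList
  rw [chain_str, PySem.Int.toList_toStr, String.toList_ofList]

-- ===== VERDICT (by name: the statement is the Claim_ definition above) =====
theorem phylo_number_to_color_spec : Claim_equal_phylo_number_to_color := by
  intro xs _
  unfold Spec_phylo_number_to_color phylo_number_to_color phylo_number_to_color_alt
  simp only [List.map_map]
  exact List.map_congr_left fun i _ => elem_eq i
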